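-- pv_equiv track=rewrite | github.com/R-Kawabata/udacity_chicago_bikeshare | chicago_bikeshare_pt.py | count_user_types
-- ===== SOURCE A (Python) =====
-- def count_user_types(data_list):
--     customer = 0
--     subscriber = 0
--     for data in data_list:
--         if data[-3] == "Customer":
--             customer += 1
--         elif data[-3] == "Subscriber":
--             subscriber += 1
--     return [customer, subscriber]
-- ===== SOURCE B (Python) =====
-- def count_user_types(data_list):
--     keys = [row[-3] for row in data_list]
--     return [keys.count(label) for label in ("Customer", "Subscriber")]
-- ===== Notes on version B (the rewrite author's own statement) =====
-- stated objective: idiomatic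
-- what changed: Replaces the single pass with two if/elif branch accumulators by staged passes: first extract the row[-3] key of every row into a list, then use list.count to count each of the two labels in a comprehension (no branching, no accumulator).
import Mathlib
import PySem

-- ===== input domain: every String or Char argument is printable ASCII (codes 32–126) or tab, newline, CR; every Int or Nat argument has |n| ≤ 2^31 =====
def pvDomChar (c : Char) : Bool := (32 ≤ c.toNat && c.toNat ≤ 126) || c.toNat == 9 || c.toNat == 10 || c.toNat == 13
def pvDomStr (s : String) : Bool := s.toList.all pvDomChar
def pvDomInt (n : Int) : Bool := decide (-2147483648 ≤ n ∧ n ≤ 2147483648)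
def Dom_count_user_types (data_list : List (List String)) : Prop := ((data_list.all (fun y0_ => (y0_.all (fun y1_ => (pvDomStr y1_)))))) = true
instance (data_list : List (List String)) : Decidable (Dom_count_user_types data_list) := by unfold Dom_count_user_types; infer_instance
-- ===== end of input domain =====

-- B replaces A's single pass with if/elif accumulators by staged passes: extract every
-- row's row[-3] key into a list, then list.count each of the two labels (idiomatic).


-- ===== PORT A =====
def count_user_types (data_list : List (List String)) : List Int :=
  let p := data_list.foldl (fun (p : Int × Int) data =>
    if (PySem.List.pyGet? data (-3)).getD "" == "Customer" then (p.1 + 1, p.2)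
    else if (PySem.List.pyGet? data (-3)).getD "" == "Subscriber" then (p.1, p.2 + 1)
    else p) (0, 0)
  [p.1, p.2]

-- ===== PORT B =====
def count_user_types_alt (data_list : List (List String)) : List Int :=
  let keys := data_list.map (fun row => (PySem.List.pyGet? row (-3)).getD "")
  ["Customer", "Subscriber"].map (fun label => (PySem.List.count keys label : Int))

-- ===== PRECONDITION & SPEC =====
-- Pre_ excludes rows shorter than 3 fields, on which A's data[-3] raises IndexError.
def Pre_count_user_types (data_list : List (List String)) : Prop :=
  ∀ row ∈ data_list, 3 ≤ row.length
instance (data_list : List (List String)) : Decidable (Pre_count_user_types data_list) := by unfold Pre_count_user_types; infer_instance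
def pvWitness_count_user_types : List (List String) :=
  [["1", "2", "Customer", "x", "y"], ["a", "Subscriber", "b"], ["u", "v", "w"]]
def Spec_count_user_types (data_list : List (List String)) (out : List Int) : Prop := out = count_user_types_alt data_list
instance (data_list : List (List String)) (out : List Int) : Decidable (Spec_count_user_types data_list out) := by unfold Spec_count_user_types; infer_instance

-- ===== CLAIM (what is proved, stated in full; the proofs are below) =====
def Claim_equal_count_user_types : Prop := ∀ (data_list : List (List String)), Dom_count_user_types data_list → Pre_count_user_types data_list → Spec_count_user_types data_list (count_user_types data_list)

-- ===== LEMMAS AND PROOFS =====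
def pvKey (row : List String) : String := (PySem.List.pyGet? row (-3)).getD ""

theorem pvFoldl_count (l : List (List String)) (c s : Int) :
    l.foldl (fun (p : Int × Int) data =>
      if pvKey data == "Customer" then (p.1 + 1, p.2)
      else if pvKey data == "Subscriber" then (p.1, p.2 + 1)
      else p) (c, s)
    = (c + ((l.map pvKey).count "Customer" : Int), s + ((l.map pvKey).count "Subscriber" : Int)) := by
  induction l generalizing c s with
  | nil => simp
  | cons h t ih =>
    simp only [List.foldl_cons, List.map_cons, List.count_cons]
    split_ifs with h1 h2 <;> rw [ih] <;> simp_all [Prod.ext_iff] <;> omega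

-- ===== VERDICT (by name: the statement is the Claim_ definition above) =====
theorem count_user_types_spec : Claim_equal_count_user_types := by
  intro dl _ _
  unfold Spec_count_user_types count_user_types count_user_types_alt
  show _ = _
  rw [show (fun (p : Int × Int) (data : List String) =>
      if (PySem.List.pyGet? data (-3)).getD "" == "Customer" then (p.1 + 1, p.2)
      else if (PySem.List.pyGet? data (-3)).getD "" == "Subscriber" then (p.1, p.2 + 1)
      else p) = (fun (p : Int × Int) data =>
      if pvKey data == "Customer" then (p.1 + 1, p.2)
      else if pvKey data == "Subscriber" then (p.1, p.2 + 1)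
      else p) from rfl]
  rw [pvFoldl_count,
    show (fun (row : List String) => (PySem.List.pyGet? row (-3)).getD "") = pvKey from rfl]
  simp [PySem.List.count_eq]
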